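-- pv_equiv track=rewrite | github.com/alinghi/PracticeAlgorithm | baekjoon/1065.py | indicator
-- ===== SOURCE A (Python) =====
-- def indicator(i):
-- 	if i<10:
-- 		return True
-- 	x=str(i)
-- 	gongcha=ord(x[0])-ord(x[1])
-- 	for i in range(1,len(x)-1):
-- 		if gongcha!=ord(x[i])-ord(x[i+1]):
-- 			return False
-- 	return True
-- ===== SOURCE B (Python) =====
-- def indicator(i):
--     if i < 10:
--         return True
--     x = str(i)
--     d = ord(x[0]) - ord(x[1])
--     return [ord(c) for c in x] == [ord(x[0]) - d * k for k in range(len(x))]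
-- ===== Notes on version B (the rewrite author's own statement) =====
-- stated objective: alternative
-- what changed: Instead of scanning consecutive digit pairs with an early-exit loop, B reconstructs the whole expected arithmetic progression from the closed form ord(x[0]) - d*k and compares it to the actual digit codes by list equality.
import Mathlib
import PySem

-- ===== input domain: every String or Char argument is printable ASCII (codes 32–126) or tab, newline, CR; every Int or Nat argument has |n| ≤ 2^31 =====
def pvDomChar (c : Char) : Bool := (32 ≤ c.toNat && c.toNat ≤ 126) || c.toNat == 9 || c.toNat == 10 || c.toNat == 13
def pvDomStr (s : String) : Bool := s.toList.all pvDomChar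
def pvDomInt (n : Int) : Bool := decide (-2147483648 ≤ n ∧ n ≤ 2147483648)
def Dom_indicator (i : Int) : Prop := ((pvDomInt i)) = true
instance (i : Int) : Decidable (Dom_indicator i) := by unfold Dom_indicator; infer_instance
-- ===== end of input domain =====

-- B replaces A's early-exit pairwise-difference scan by reconstructing the expected
-- arithmetic progression in closed form and comparing it to the digit codes (alternative, same cost).

-- ord(c) as a Python int
def ordI (c : Char) : Int := (c.toNat : Int)

-- ===== PORT A =====
-- the for-loop of A with its early 'return False'
def indicatorGo (x : List Char) (gongcha : Int) : List Int → Bool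
  | [] => true
  | j :: js =>
    match PySem.List.pyGet? x j, PySem.List.pyGet? x (j + 1) with
    | some a, some b =>
        if gongcha ≠ ordI a - ordI b then false else indicatorGo x gongcha js
    | _, _ => false   -- IndexError (unreachable: j, j+1 in range for j ∈ range(1, len-1))

def indicator (i : Int) : Bool :=
  if i < 10 then true
  else
    let x := (PySem.Int.toStr i).toList
    match PySem.List.pyGet? x 0, PySem.List.pyGet? x 1 with
    | some c0, some c1 =>
        indicatorGo x (ordI c0 - ordI c1) (PySem.List.pyRange 1 ((x.length : Int) - 1) 1)
    | _, _ => true    -- IndexError (unreachable: len(str(i)) ≥ 2 for i ≥ 10)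

-- ===== PORT B =====
def indicator_alt (i : Int) : Bool :=
  if i < 10 then true
  else
    let x := (PySem.Int.toStr i).toList
    match PySem.List.pyGet? x 0, PySem.List.pyGet? x 1 with
    | some c0, some c1 =>
        let d := ordI c0 - ordI c1
        (x.map ordI) == (PySem.List.pyRange 0 (x.length : Int) 1).map (fun k => ordI c0 - d * k)
    | _, _ => true    -- IndexError (unreachable: len(str(i)) ≥ 2 for i ≥ 10)

-- ===== PRECONDITION & SPEC =====
def Spec_indicator (i : Int) (out : Bool) : Prop := out = indicator_alt i
instance (i : Int) (out : Bool) : Decidable (Spec_indicator i out) := by unfold Spec_indicator; infer_instance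

-- ===== CLAIM (what is proved, stated in full; the proofs are below) =====
def Claim_equal_indicator : Prop := ∀ (i : Int), Dom_indicator i → Spec_indicator i (indicator i)

-- ===== LEMMAS AND PROOFS =====

-- A's loop with early exit is the conjunction of its per-index checks
lemma indicatorGo_eq_all (x : List Char) (g : Int) (js : List Int) :
    indicatorGo x g js = js.all (fun j =>
      match PySem.List.pyGet? x j, PySem.List.pyGet? x (j + 1) with
      | some a, some b => g == ordI a - ordI b
      | _, _ => false) := by
  induction js with
  | nil => rfl
  | cons j js ih =>
    simp only [indicatorGo, List.all_cons]
    cases h1 : PySem.List.pyGet? x j with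
    | none => rfl
    | some a =>
      cases h2 : PySem.List.pyGet? x (j + 1) with
      | none => rfl
      | some b =>
        by_cases hg : g = ordI a - ordI b
        · subst hg; simp [ih]
        · simp [hg]

-- the abstract fact: constant consecutive differences ⟺ the closed-form AP values
lemma ap_iff (f : Int → Int) (d m : Int) (_hm : 2 ≤ m) (hd : f 0 - f 1 = d) :
    (∀ j : Int, 1 ≤ j → j < m - 1 → d = f j - f (j + 1)) ↔
    (∀ k : Int, 0 ≤ k → k < m → f k = f 0 - d * k) := by
  constructor
  · intro H
    have aux : ∀ k : Nat, (k : Int) < m → f k = f 0 - d * k := by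
      intro k
      induction k with
      | zero => intro _; simp
      | succ n ih =>
        intro hlt
        have hn : ((n + 1 : Nat) : Int) = (n : Int) + 1 := by push_cast; ring
        rw [hn] at hlt ⊢
        have ihn := ih (by omega)
        have hdn : d = f (n : Int) - f ((n : Int) + 1) := by
          by_cases h0 : (n : Int) = 0
          · rw [h0]; simpa using hd.symm
          · exact H (n : Int) (by omega) (by omega)
        have e : d * ((n : Int) + 1) = d * (n : Int) + d := by ring
        linarith
    intro k hk0 hkm
    have hc : ((k.toNat : Nat) : Int) = k := by omega
    have := aux k.toNat (by omega)
    rwa [hc] at this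
  · intro H j h1 hj
    have a1 := H j (by omega) (by omega)
    have a2 := H (j + 1) (by omega) (by omega)
    have e : d * (j + 1) = d * j + d := by ring
    linarith

-- in-range pyGet? through getD
lemma pyGet?_in_range (x : List Char) (j : Int) (h0 : 0 ≤ j) (h : j < (x.length : Int)) :
    PySem.List.pyGet? x j = some (x.getD j.toNat ' ') := by
  have hlt : j.toNat < x.length := by omega
  rw [PySem.List.pyGet?_eq_some_getElem x h0 h, List.getD_eq_getElem]

-- B's list comparison, pointwise
lemma listEq_iff (x : List Char) (c0 : Char) (d : Int) :
    ((x.map ordI) == (PySem.List.pyRange 0 (x.length : Int) 1).map (fun k => ordI c0 - d * k)) = true ↔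
    (∀ k : Int, 0 ≤ k → k < (x.length : Int) → ordI (x.getD k.toNat ' ') = ordI c0 - d * k) := by
  rw [beq_iff_eq]
  constructor
  · intro h k hk0 hkm
    have hlt : k.toNat < x.length := by omega
    have h1 : (x.map ordI)[k.toNat]'(by simpa using hlt) =
        ((PySem.List.pyRange 0 (x.length : Int) 1).map (fun k => ordI c0 - d * k))[k.toNat]'(by
          simp [PySem.List.length_pyRange_one]; omega) := by
      exact List.getElem_of_eq h _
    simp only [List.getElem_map, PySem.List.getElem_pyRange_one] at h1
    have hc : (0 : Int) + (k.toNat : Int) = k := by omega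
    rw [hc] at h1
    rw [List.getD_eq_getElem _ _ hlt]
    simpa using h1
  · intro H
    apply List.ext_getElem
    · simp [PySem.List.length_pyRange_one]
    · intro n h1 h2
      simp only [List.getElem_map, PySem.List.getElem_pyRange_one]
      have hn : n < x.length := by simpa using h1
      have := H (n : Int) (by omega) (by omega)
      simp only [Int.toNat_natCast] at this
      rw [List.getD_eq_getElem _ _ hn] at this
      rw [this]; ring
-- ===== VERDICT (by name: the statement is the Claim_ definition above) =====
theorem indicator_spec : Claim_equal_indicator := by
  intro i _
  show indicator i = indicator_alt i
  unfold indicator indicator_alt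
  by_cases h : i < 10
  · simp [h]
  · simp only [h, if_false]
    cases hx : (PySem.Int.toStr i).toList with
    | nil => simp [PySem.List.pyGet?, PySem.List.pyIdx?]
    | cons c0 t =>
      cases t with
      | nil => simp [PySem.List.pyGet?, PySem.List.pyIdx?]
      | cons c1 r =>
        have h0 : PySem.List.pyGet? (c0 :: c1 :: r) 0 = some c0 :=
          PySem.List.pyGet?_zero_cons c0 (c1 :: r)
        have h1 : PySem.List.pyGet? (c0 :: c1 :: r) 1 = some c1 := by
          rw [PySem.List.pyGet?_eq_some_getElem (c0 :: c1 :: r) (i := 1) (by omega) (by simp)]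
          rfl
        simp only [h0, h1]
        set x := c0 :: c1 :: r with hxdef
        set d : Int := ordI c0 - ordI c1 with hd
        have hlen : (2 : Int) ≤ (x.length : Int) := by simp [hxdef]; omega
        have hget : ∀ j : Int, 0 ≤ j → j < (x.length : Int) →
            PySem.List.pyGet? x j = some (x.getD j.toNat ' ') := fun j a b =>
          pyGet?_in_range x j a b
        have e0 : x.getD 0 ' ' = c0 := by simp [hxdef]
        have e1 : x.getD 1 ' ' = c1 := by simp [hxdef]
        have key := ap_iff (fun j : Int => ordI (x.getD j.toNat ' ')) d (x.length : Int) hlen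
          (by simp only [Int.toNat_zero, Int.toNat_one, e0, e1, hd])
        rw [indicatorGo_eq_all, Bool.eq_iff_iff, listEq_iff]
        simp only [List.all_eq_true, PySem.List.mem_pyRange_one, and_imp]
        constructor
        · intro H
          refine (key.mp ?_)
          intro j hj1 hjm
          have hA := H j hj1 hjm
          rw [hget j (by omega) (by omega), hget (j + 1) (by omega) (by omega)] at hA
          simpa only [beq_iff_eq] using hA
        · intro H j hj1 hjm
          rw [hget j (by omega) (by omega), hget (j + 1) (by omega) (by omega)]
          simp only [beq_iff_eq]
          exact key.mpr (by simpa [e0] using H) j hj1 hjm
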